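-- pv_equiv track=rewrite | github.com/vancuongbui/datx-common | common/ticker_recognition/utils.py | xoa_cham_trong_so
-- ===== SOURCE A (Python) =====
-- def xoa_cham_trong_so(text):
--     for k in range(0,len(text)):
--         if len(text) <4:
--             break
--         if k == len(text) - 3:
--             break
--         if text[k].isnumeric() == True and text[k+1] == "." and text[k+2] != " ":
--             temp = list(text)
--             temp[k+1] = " "
--             text = "".join(temp)
--     return text
-- ===== SOURCE B (Python) =====
-- def xoa_cham_trong_so(text):
--     n = len(text)
--     if n < 4:
--         return text
--     return "".join(
--         " " if 1 <= i <= n - 3 and text[i - 1].isnumeric() and c == "." and text[i + 1] != " " else c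
--         for i, c in enumerate(text)
--     )
-- ===== Notes on version B (the rewrite author's own statement) =====
-- stated objective: simpler
-- what changed: A repeatedly rebuilds the whole string (list(text) + join) inside an indexed loop over a mutating string; B is one stateless pass over the original string, mapping each character by a condition on its neighbours, exploiting the fact that A's in-place dot-to-space replacements can never change the outcome of later checks.
import Mathlib
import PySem

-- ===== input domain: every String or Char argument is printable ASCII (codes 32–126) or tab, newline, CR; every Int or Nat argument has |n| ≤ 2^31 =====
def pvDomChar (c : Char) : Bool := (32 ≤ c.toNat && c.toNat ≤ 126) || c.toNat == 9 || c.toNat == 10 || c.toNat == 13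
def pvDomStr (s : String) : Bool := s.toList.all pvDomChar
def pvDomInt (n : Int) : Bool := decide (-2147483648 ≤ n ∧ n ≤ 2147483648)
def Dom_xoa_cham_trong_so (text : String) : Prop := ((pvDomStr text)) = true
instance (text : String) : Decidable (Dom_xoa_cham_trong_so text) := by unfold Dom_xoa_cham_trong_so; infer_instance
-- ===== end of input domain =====

-- B replaces A's indexed loop over a mutating string (rebuilding the whole string at each hit)
-- by a single stateless pass over the original string; objective: simpler.

-- ===== PORT A =====
-- Python's str.isnumeric, exact on the ASCII domain (only '0'-'9' are numeric there).
def pvIsNum (c : Char) : Bool := '0' ≤ c && c ≤ '9'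

-- the for-loop of A: state is the (possibly updated) character list; k the loop index,
-- n the fixed range bound len(text) (replacements preserve the length, so indexing text[k],
-- text[k+1], text[k+2] is always in range here and List.getD is exact).
def xoaLoop (cs : List Char) (k n : Nat) : List Char :=
  if k < n then
    if cs.length < 4 then cs
    else if k = cs.length - 3 then cs
    else
      let cs' := if pvIsNum (cs.getD k ' ') && (cs.getD (k+1) ' ' == '.')
                    && !(cs.getD (k+2) ' ' == ' ')
                 then cs.set (k+1) ' ' else cs
      xoaLoop cs' (k+1) n
  else cs
termination_by n - k

def xoa_cham_trong_so (text : String) : String :=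
  String.ofList (xoaLoop text.toList 0 text.toList.length)

-- ===== PORT B =====
-- one pass: character i of the output is ' ' iff i is a dot in replacement range whose
-- predecessor is numeric and whose successor is not a space (all read from the original string).
def xoa_cham_trong_so_alt (text : String) : String :=
  let cs := text.toList
  let n := cs.length
  if n < 4 then text
  else String.ofList ((List.range n).map (fun i =>
    if 1 ≤ i && i ≤ n - 3 && pvIsNum (cs.getD (i-1) ' ')
       && (cs.getD i ' ' == '.') && !(cs.getD (i+1) ' ' == ' ')
    then ' ' else cs.getD i ' '))

-- ===== PRECONDITION & SPEC =====
def Spec_xoa_cham_trong_so (text : String) (out : String) : Prop := out = xoa_cham_trong_so_alt text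
instance (text : String) (out : String) : Decidable (Spec_xoa_cham_trong_so text out) := by unfold Spec_xoa_cham_trong_so; infer_instance

-- ===== CLAIM (what is proved, stated in full; the proofs are below) =====
def Claim_equal_xoa_cham_trong_so : Prop := ∀ (text : String), Dom_xoa_cham_trong_so text → Spec_xoa_cham_trong_so text (xoa_cham_trong_so text)

-- ===== LEMMAS AND PROOFS =====

-- condition at dot-position i, read on the original list
def dotCond (cs : List Char) (i : Nat) : Bool :=
  pvIsNum (cs.getD (i-1) ' ') && (cs.getD i ' ' == '.') && !(cs.getD (i+1) ' ' == ' ')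

-- the list after processing all dot positions ≤ m
def upd (cs : List Char) (m : Nat) : List Char :=
  (List.range cs.length).map (fun i => if 1 ≤ i && i ≤ m && dotCond cs i then ' ' else cs.getD i ' ')

lemma upd_length (cs : List Char) (m : Nat) : (upd cs m).length = cs.length := by
  simp [upd]

lemma upd_getElem (cs : List Char) (m i : Nat) (h : i < cs.length) :
    (upd cs m)[i]'(by simpa [upd_length] using h) =
      if 1 ≤ i && i ≤ m && dotCond cs i then ' ' else cs.getD i ' ' := by
  simp [upd]

lemma upd_getD (cs : List Char) (m i : Nat) :
    (upd cs m).getD i ' ' =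
      if 1 ≤ i && i ≤ m && dotCond cs i then ' ' else cs.getD i ' ' := by
  by_cases h : i < cs.length
  · rw [List.getD_eq_getElem _ _ (by simpa [upd_length] using h)]
    exact upd_getElem cs m i h
  · have h1 : (upd cs m).getD i ' ' = ' ' :=
      List.getD_eq_default _ _ (by simpa [upd_length] using Nat.le_of_not_lt h)
    have h2 : cs.getD i ' ' = ' ' := List.getD_eq_default _ _ (Nat.le_of_not_lt h)
    have h3 : dotCond cs i = false := by
      simp [dotCond, List.getD, List.getElem?_eq_none (Nat.le_of_not_lt h)]
    rw [h1, h2, h3]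
    simp

lemma upd_zero (cs : List Char) : upd cs 0 = cs := by
  apply List.ext_getElem (by simp [upd_length])
  intro i h1 h2
  rw [upd_getElem cs 0 i h2]
  have : (1 ≤ i && i ≤ 0 && dotCond cs i) = false := by
    cases i <;> simp
  rw [this]
  simp only [Bool.false_eq_true, if_false]
  exact List.getD_eq_getElem _ _ h2

-- predecessor-read stability: the character A's step reads at position i-1 may have been
-- overwritten (to ' ') by an earlier iteration, but only when it was a '.', so the
-- isnumeric test is unaffected.
lemma isnum_upd (cs : List Char) (k i : Nat) :
    pvIsNum ((upd cs k).getD i ' ') = pvIsNum (cs.getD i ' ') := by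
  rw [upd_getD]
  by_cases h : (1 ≤ i && i ≤ k && dotCond cs i) = true
  · rw [if_pos h]
    have hd : dotCond cs i = true := ((Bool.and_eq_true _ _).mp h).2
    have hdot : cs.getD i ' ' = '.' := by
      simp [dotCond] at hd
      exact hd.1.2
    rw [hdot]
    decide
  · rw [if_neg h]

lemma upd_getD_of_gt (cs : List Char) (k i : Nat) (h : k < i) :
    (upd cs k).getD i ' ' = cs.getD i ' ' := by
  rw [upd_getD]
  have : (1 ≤ i && i ≤ k && dotCond cs i) = false := by
    simp; intro _ h2; omega
  rw [this]
  simp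

-- A's step condition at index k equals dotCond on the ORIGINAL list at position k+1
lemma step_cond (cs : List Char) (k : Nat) :
    (pvIsNum ((upd cs k).getD k ' ') && ((upd cs k).getD (k+1) ' ' == '.')
      && !((upd cs k).getD (k+2) ' ' == ' ')) = dotCond cs (k+1) := by
  rw [isnum_upd, upd_getD_of_gt cs k (k+1) (by omega), upd_getD_of_gt cs k (k+2) (by omega)]
  simp [dotCond]

lemma upd_set (cs : List Char) (k : Nat) (hc : dotCond cs (k+1) = true) :
    (upd cs k).set (k+1) ' ' = upd cs (k+1) := by
  apply List.ext_getElem (by simp [upd_length])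
  intro i h1 h2
  rw [List.getElem_set]
  rw [upd_getElem cs (k+1) i (by simpa [upd_length] using h2)]
  by_cases hi : k + 1 = i
  · subst hi
    simp [hc]
  · rw [if_neg hi, upd_getElem cs k i (by simpa [upd_length] using h1)]
    have : (i ≤ k + 1) = (i ≤ k) := by
      apply propext; constructor <;> intro h <;> omega
    simp [this]

lemma upd_noset (cs : List Char) (k : Nat) (hc : dotCond cs (k+1) = false) :
    upd cs k = upd cs (k+1) := by
  apply List.ext_getElem (by simp [upd_length])
  intro i h1 h2
  rw [upd_getElem cs k i (by simpa [upd_length] using h1),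
      upd_getElem cs (k+1) i (by simpa [upd_length] using h2)]
  by_cases hi : i = k + 1
  · subst hi; simp [hc]
  · have : (i ≤ k + 1) = (i ≤ k) := by
      apply propext; constructor <;> intro h <;> omega
    simp [this]

lemma xoaLoop_inv (cs : List Char) (n : Nat) (hn : n = cs.length) (h4 : 4 ≤ n) :
    ∀ k, k ≤ n - 3 → xoaLoop (upd cs k) k n = upd cs (n - 3) := by
  intro k hk
  induction hd : n - 3 - k generalizing k with
  | zero =>
    have hke : k = n - 3 := by omega
    subst hke
    rw [xoaLoop]
    rw [if_pos (by omega)]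
    rw [if_neg (by rw [upd_length, ← hn]; omega)]
    rw [if_pos (by rw [upd_length, ← hn])]
  | succ d ih =>
    have hklt : k < n - 3 := by omega
    rw [xoaLoop]
    rw [if_pos (by omega)]
    rw [if_neg (by rw [upd_length, ← hn]; omega)]
    rw [if_neg (by rw [upd_length, ← hn]; omega)]
    rw [step_cond]
    by_cases hc : dotCond cs (k+1) = true
    · rw [if_pos hc, upd_set cs k hc]
      exact ih (k+1) (by omega) (by omega)
    · rw [if_neg hc, upd_noset cs k (Bool.eq_false_iff.mpr hc)]
      exact ih (k+1) (by omega) (by omega)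

lemma xoaLoop_small (cs : List Char) (n : Nat) (h : cs.length < 4) :
    xoaLoop cs 0 n = cs := by
  rw [xoaLoop]
  by_cases hn : 0 < n
  · rw [if_pos hn, if_pos h]
  · rw [if_neg hn]

-- ===== VERDICT (by name: the statement is the Claim_ definition above) =====
theorem xoa_cham_trong_so_spec : Claim_equal_xoa_cham_trong_so := by
  intro text _
  unfold Spec_xoa_cham_trong_so xoa_cham_trong_so xoa_cham_trong_so_alt
  set cs := text.toList with hcs
  by_cases h4 : cs.length < 4
  · simp only [if_pos h4]
    rw [xoaLoop_small cs _ h4, hcs, String.ofList_toList]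
  · simp only [if_neg h4]
    have h4' : 4 ≤ cs.length := Nat.le_of_not_lt h4
    have := xoaLoop_inv cs cs.length rfl h4' 0 (by omega)
    rw [upd_zero] at this
    rw [this]
    congr 1
    simp only [upd, dotCond, Bool.and_assoc]
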